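-- pv_equiv track=rewrite | github.com/Venhoff-cpu/Python_exercises | Other/string_split2.py | solution
-- ===== SOURCE A (Python) =====
-- from itertools import combinations
--
-- def solution(S):
--     string_range = range(1, len(S))
--
--     result = sum(
--         1
--         for start, end
--         in combinations(string_range, 2)
--         if 'a' in S[:start] and 'a' in S[start:end] and 'a' in S[end:]
--     )
--
--     return result
-- ===== SOURCE B (Python) =====
-- def solution(S):
--     pos = [i for i, c in enumerate(S) if c == 'a']
--     if len(pos) < 3:
--         return 0
--     gaps = [q - p for p, q in zip(pos, pos[1:])]
--     total = sum(gaps)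
--     return (total * total - sum(g * g for g in gaps)) // 2
-- ===== Notes on version B (the rewrite author's own statement) =====
-- stated objective: faster
-- what changed: Replaces the cubic scan over all index pairs (combinations plus three substring searches per pair) by a one-pass collection of the positions of the letter a and a closed-form count from the consecutive gaps: (T^2 - sum of squared gaps) / 2.
import Mathlib
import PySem

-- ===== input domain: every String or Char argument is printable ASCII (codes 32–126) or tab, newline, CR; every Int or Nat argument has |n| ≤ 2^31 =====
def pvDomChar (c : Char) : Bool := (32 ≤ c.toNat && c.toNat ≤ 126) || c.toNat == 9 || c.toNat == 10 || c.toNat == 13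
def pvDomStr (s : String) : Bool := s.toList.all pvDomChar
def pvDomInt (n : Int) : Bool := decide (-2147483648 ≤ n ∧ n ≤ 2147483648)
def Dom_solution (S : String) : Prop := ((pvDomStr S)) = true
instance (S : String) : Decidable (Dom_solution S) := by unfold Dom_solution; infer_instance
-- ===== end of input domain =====

-- B replaces A's cubic scan over all split pairs by a one-pass collection of the
-- positions of the letter a and a closed-form count from the consecutive gaps (faster).

-- ===== PORT A =====
-- itertools.combinations(range(1, len(S)), 2) is ported literally as the flatMap
-- producing the ordered pairs (start, end) with start < end, in the same order.
def solution (S : String) : Int :=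
  let n : Int := PySem.Str.len S
  ((PySem.List.pyRange 1 n 1).flatMap (fun s => (PySem.List.pyRange (s + 1) n 1).map (fun e => (s, e)))).foldl
    (fun acc p =>
      if PySem.Str.isIn "a" (PySem.Str.slice S none (some p.1)) &&
         PySem.Str.isIn "a" (PySem.Str.slice S (some p.1) (some p.2)) &&
         PySem.Str.isIn "a" (PySem.Str.slice S (some p.2) none)
      then acc + 1 else acc) 0

-- ===== PORT B =====
def solution_alt (S : String) : Int :=
  let pos : List Int := ((PySem.List.enumerate S.toList 0).filter (fun p => p.2 == 'a')).map (·.1)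
  if pos.length < 3 then 0
  else
    let gaps : List Int := (pos.zip pos.tail).map (fun pq => pq.2 - pq.1)
    let total : Int := gaps.sum
    PySem.Int.floordiv (total * total - (gaps.map (fun g => g * g)).sum) 2

-- ===== PRECONDITION & SPEC =====
def Spec_solution (S : String) (out : Int) : Prop := out = solution_alt S
instance (S : String) (out : Int) : Decidable (Spec_solution S out) := by unfold Spec_solution; infer_instance

-- ===== CLAIM (what is proved, stated in full; the proofs are below) =====
def Claim_equal_solution : Prop := ∀ (S : String), Dom_solution S → Spec_solution S (solution S)

-- ===== LEMMAS AND PROOFS =====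

-- the list of positions of 'a' in L, in increasing order
def aPos (L : List Char) : List Nat := (List.range L.length).filter (fun i => L.getD i ' ' == 'a')

-- number of 'a'-positions strictly below x
def rk (P : List Nat) (x : Int) : Nat := P.countP (fun (p : Nat) => decide ((p : Int) < x))

lemma mem_aPos {L : List Char} {i : Nat} : i ∈ aPos L ↔ i < L.length ∧ L.getD i ' ' = 'a' := by
  simp [aPos]

lemma sorted_aPos (L : List Char) : (aPos L).Pairwise (· < ·) :=
  (List.pairwise_lt_range).filter _

-- ---------- membership of 'a' in take/drop pieces ----------

lemma mem_char_iff (l : List Char) : 'a' ∈ l ↔ ∃ i, ∃ h : i < l.length, l[i] = 'a' :=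
  List.mem_iff_getElem

lemma mem_take_iff (L : List Char) (t : Nat) : 'a' ∈ L.take t ↔ ∃ i ∈ aPos L, i < t := by
  rw [mem_char_iff]
  constructor
  · rintro ⟨i, hi, hget⟩
    have h2 : i < t ∧ i < L.length := by simp [List.length_take] at hi; omega
    refine ⟨i, mem_aPos.2 ⟨h2.2, ?_⟩, h2.1⟩
    rw [List.getD_eq_getElem _ _ h2.2, ← List.getElem_take (xs := L) (h := hi)]; exact hget
  · rintro ⟨i, hmem, hit⟩
    obtain ⟨hiN, hA⟩ := mem_aPos.1 hmem
    refine ⟨i, by simp [List.length_take]; omega, ?_⟩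
    rw [List.getElem_take, ← List.getD_eq_getElem _ ' ']; exact hA

lemma mem_drop_iff (L : List Char) (u : Nat) : 'a' ∈ L.drop u ↔ ∃ i ∈ aPos L, u ≤ i := by
  rw [mem_char_iff]
  constructor
  · rintro ⟨k, hk, hget⟩
    have hkN : u + k < L.length := by simp [List.length_drop] at hk; omega
    refine ⟨u + k, mem_aPos.2 ⟨hkN, ?_⟩, by omega⟩
    rw [List.getD_eq_getElem _ _ hkN, ← List.getElem_drop (h := hk)]; exact hget
  · rintro ⟨i, hmem, hui⟩
    obtain ⟨hiN, hA⟩ := mem_aPos.1 hmem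
    refine ⟨i - u, by simp [List.length_drop]; omega, ?_⟩
    rw [List.getElem_drop (h := by simp [List.length_drop]; omega)]
    rw [List.getD_eq_getElem _ _ hiN] at hA
    simp only [Nat.add_sub_cancel' hui]; exact hA

lemma mem_drop_take_iff (L : List Char) (u v : Nat) :
    'a' ∈ (L.drop u).take v ↔ ∃ i ∈ aPos L, u ≤ i ∧ i < u + v := by
  constructor
  · intro h
    obtain ⟨k, hk, hget⟩ := mem_char_iff _ |>.1 h
    have hk2 : k < v ∧ k < L.length - u := by simp [List.length_take, List.length_drop] at hk; omega
    have hkd : k < (L.drop u).length := by simp [List.length_drop]; omega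
    refine ⟨u + k, mem_aPos.2 ⟨by omega, ?_⟩, by omega, by omega⟩
    rw [List.getD_eq_getElem _ _ (by omega), ← List.getElem_drop (h := hkd)]
    rw [← List.getElem_take (xs := L.drop u) (h := hk)]; exact hget
  · rintro ⟨i, hmem, hui, hiv⟩
    obtain ⟨hiN, hA⟩ := mem_aPos.1 hmem
    rw [mem_char_iff]
    refine ⟨i - u, by simp [List.length_take, List.length_drop]; omega, ?_⟩
    rw [List.getElem_take, List.getElem_drop (h := by simp [List.length_drop]; omega)]
    rw [List.getD_eq_getElem _ _ hiN] at hA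
    simp only [Nat.add_sub_cancel' hui]; exact hA

-- ---------- rank lemmas ----------

lemma rk_le (P : List Nat) (x : Int) : rk P x ≤ P.length := List.countP_le_length

lemma rk_mono (P : List Nat) {x y : Int} (h : x ≤ y) : rk P x ≤ rk P y :=
  List.countP_mono_left (fun p _ hp => by simp only [decide_eq_true_eq] at hp ⊢; omega)

lemma rk_pos_iff (P : List Nat) (x : Int) : 0 < rk P x ↔ ∃ p ∈ P, (p : Int) < x := by
  rw [rk, List.countP_pos_iff]
  simp only [decide_eq_true_eq]

lemma rk_split (P : List Nat) {s e : Int} (h : s ≤ e) :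
    rk P e = rk P s + P.countP (fun (p : Nat) => decide (s ≤ (p : Int)) && decide ((p : Int) < e)) := by
  induction P with
  | nil => simp [rk]
  | cons q t ih =>
    have e1 : rk (q :: t) e = rk t e + (if (q : Int) < e then 1 else 0) := by
      simp [rk, List.countP_cons]
    have e2 : rk (q :: t) s = rk t s + (if (q : Int) < s then 1 else 0) := by
      simp [rk, List.countP_cons]
    have e3 : (q :: t).countP (fun (p : Nat) => decide (s ≤ (p : Int)) && decide ((p : Int) < e))
        = t.countP (fun (p : Nat) => decide (s ≤ (p : Int)) && decide ((p : Int) < e))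
          + (if s ≤ (q : Int) ∧ (q : Int) < e then 1 else 0) := by
      simp [List.countP_cons]
    rw [e1, e2, e3, ih]
    by_cases h1 : (q : Int) < s <;> by_cases h2 : (q : Int) < e <;> by_cases h3 : s ≤ (q : Int) <;>
      simp [h1, h2, h3] <;> omega

lemma rk_lt_rk_iff (P : List Nat) (s e : Int) :
    rk P s < rk P e ↔ ∃ p ∈ P, s ≤ (p : Int) ∧ (p : Int) < e := by
  by_cases hse : s ≤ e
  · rw [rk_split P hse]
    constructor
    · intro h
      have hpos : 0 < P.countP (fun (p : Nat) => decide (s ≤ (p : Int)) && decide ((p : Int) < e)) := by omega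
      obtain ⟨p, hp, hb⟩ := List.countP_pos_iff.1 hpos
      simp only [Bool.and_eq_true, decide_eq_true_eq] at hb
      exact ⟨p, hp, hb⟩
    · rintro ⟨p, hp, h1, h2⟩
      have : 0 < P.countP (fun (p : Nat) => decide (s ≤ (p : Int)) && decide ((p : Int) < e)) :=
        List.countP_pos_iff.2 ⟨p, hp, by simp [h1, h2]⟩
      omega
  · constructor
    · intro h; exact absurd (rk_mono P (by omega : e ≤ s)) (by omega)
    · rintro ⟨p, hp, h1, h2⟩; omega

lemma rk_lt_len_iff (P : List Nat) (e : Int) :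
    rk P e < P.length ↔ ∃ p ∈ P, e ≤ (p : Int) := by
  rcases Nat.lt_or_ge (rk P e) P.length with h | h
  · simp only [h, true_iff]
    by_contra hno
    push Not at hno
    have : rk P e = P.length := by
      rw [rk, List.countP_eq_length]
      intro p hp
      simp only [decide_eq_true_eq]
      have := hno p hp; omega
    omega
  · have heq : rk P e = P.length := le_antisymm (rk_le P e) h
    simp only [Nat.lt_irrefl, heq, false_iff]
    push Not
    intro p hp
    have hall := List.countP_eq_length.1 heq p hp
    simp only [decide_eq_true_eq] at hall
    omega

lemma lt_rk_iff (P : List Nat) (hs : P.Pairwise (· < ·)) {j : Nat} (hj : j < P.length) (x : Int) :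
    j < rk P x ↔ (P[j] : Int) < x := by
  induction P generalizing j with
  | nil => simp at hj
  | cons q t ih =>
    have hq : ∀ p ∈ t, q < p := fun p hp => (List.pairwise_cons.1 hs).1 p hp
    match j with
    | 0 =>
      simp only [List.getElem_cons_zero]
      constructor
      · intro h
        by_cases hqx : (q : Int) < x
        · exact hqx
        · exfalso
          rw [rk, List.countP_cons] at h
          simp only [decide_eq_false hqx, Bool.false_eq_true, if_false] at h
          have hpos : 0 < t.countP (fun (p : Nat) => decide ((p : Int) < x)) := by omega
          obtain ⟨p, hp, hb⟩ := List.countP_pos_iff.1 hpos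
          simp only [decide_eq_true_eq] at hb
          have := hq p hp; omega
      · intro h
        exact (rk_pos_iff _ _).2 ⟨q, List.mem_cons_self, h⟩
    | j + 1 =>
      simp only [List.getElem_cons_succ]
      rw [rk, List.countP_cons, ← rk]
      by_cases hqx : (q : Int) < x
      · rw [← ih (List.pairwise_cons.1 hs).2 (by simpa using hj)]
        simp [hqx]
      · have hz : rk t x = 0 := by
          rw [rk, List.countP_eq_zero]
          intro p hp
          simp only [decide_eq_true_eq]
          have := hq p hp
          intro hc; omega
        have hmem : (t[j]'(by simpa using hj)) ∈ t := List.getElem_mem _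
        have := hq _ hmem
        simp [hqx, hz]
        omega

-- ---------- pyRange / Finset bridges ----------

lemma toFinset_pyRange (a b : Int) : (PySem.List.pyRange a b 1).toFinset = Finset.Ico a b := by
  ext x; simp [PySem.List.mem_pyRange_one, Finset.mem_Ico]

lemma countP_pyRange (a b : Int) (q : Int → Bool) :
    (PySem.List.pyRange a b 1).countP q = ((Finset.Ico a b).filter (fun x => q x)).card := by
  rw [List.countP_eq_length_filter, ← toFinset_pyRange, ← List.toFinset_filter]
  exact (List.toFinset_card_of_nodup ((PySem.List.nodup_pyRange_one a b).filter _)).symm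

lemma sum_map_pyRange (a b : Int) (f : Int → Nat) :
    ((PySem.List.pyRange a b 1).map f).sum = ∑ x ∈ Finset.Ico a b, f x := by
  rw [← toFinset_pyRange]
  exact (List.sum_toFinset f (PySem.List.nodup_pyRange_one a b)).symm

lemma countP_flatMap {α β : Type} (l : List α) (g : α → List β) (p : β → Bool) :
    (l.flatMap g).countP p = (l.map (fun x => (g x).countP p)).sum := by
  induction l with
  | nil => simp
  | cons h t ih => simp [List.countP_append, ih]

-- ---------- the Boolean test of port A ----------

def qb (S : String) (s e : Int) : Bool :=
  PySem.Str.isIn "a" (PySem.Str.slice S none (some s)) &&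
  PySem.Str.isIn "a" (PySem.Str.slice S (some s) (some e)) &&
  PySem.Str.isIn "a" (PySem.Str.slice S (some e) none)

lemma isIn_a_iff (t : String) : PySem.Str.isIn "a" t = true ↔ 'a' ∈ t.toList := by
  rw [PySem.Str.isIn_iff_infix]
  exact List.singleton_infix_iff _ _

lemma qb_iff (S : String) {s e : Int} (hs : 1 ≤ s) (hse : s < e) :
    (qb S s e = true) ↔ (0 < rk (aPos S.toList) s ∧ rk (aPos S.toList) s < rk (aPos S.toList) e ∧
      rk (aPos S.toList) e < (aPos S.toList).length) := by
  have h0s : (0 : Int) ≤ s := by omega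
  have h0e : (0 : Int) ≤ e := by omega
  rw [qb, Bool.and_eq_true, Bool.and_eq_true, isIn_a_iff, isIn_a_iff, isIn_a_iff]
  rw [PySem.Str.toList_slice, PySem.Str.toList_slice, PySem.Str.toList_slice]
  rw [PySem.Chars.slice_eq_listSlice, PySem.Chars.slice_eq_listSlice, PySem.Chars.slice_eq_listSlice]
  rw [PySem.List.slice_to S.toList h0s, PySem.List.slice_toNat S.toList h0s h0e,
    PySem.List.slice_from S.toList h0e]
  rw [mem_take_iff, mem_drop_take_iff, mem_drop_iff]
  rw [rk_pos_iff, rk_lt_rk_iff, rk_lt_len_iff]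
  constructor
  · rintro ⟨⟨⟨i1, h1, hi1⟩, ⟨i2, h2, hi2a, hi2b⟩⟩, ⟨i3, h3, hi3⟩⟩
    refine ⟨⟨i1, h1, by omega⟩, ⟨i2, h2, by omega⟩, ⟨i3, h3, by omega⟩⟩
  · rintro ⟨⟨i1, h1, hi1⟩, ⟨i2, h2, hi2a, hi2b⟩, ⟨i3, h3, hi3⟩⟩
    refine ⟨⟨⟨i1, h1, by omega⟩, ⟨i2, h2, by omega, by omega⟩⟩, ⟨i3, h3, by omega⟩⟩

-- ---------- port A as a double Finset sum over rank conditions ----------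

lemma solution_eq_qb_sum (S : String) :
    solution S = ((∑ s ∈ Finset.Ico (1 : Int) (PySem.Str.len S),
      ((Finset.Ico (s + 1) (PySem.Str.len S)).filter (fun e => qb S s e)).card : Nat) : Int) := by
  rw [solution]
  have hq : (fun (acc : Int) (p : Int × Int) =>
      if PySem.Str.isIn "a" (PySem.Str.slice S none (some p.1)) &&
         PySem.Str.isIn "a" (PySem.Str.slice S (some p.1) (some p.2)) &&
         PySem.Str.isIn "a" (PySem.Str.slice S (some p.2) none)
      then acc + 1 else acc)
      = fun (acc : Int) (p : Int × Int) => if qb S p.1 p.2 then acc + 1 else acc := rfl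
  rw [hq]
  have h := PySem.List.foldl_count_if (fun p : Int × Int => qb S p.1 p.2)
    ((PySem.List.pyRange 1 (PySem.Str.len S) 1).flatMap
      (fun s => (PySem.List.pyRange (s + 1) (PySem.Str.len S) 1).map (fun e => (s, e)))) 0
  simp only [] at h
  rw [h, countP_flatMap]
  rw [zero_add, ← sum_map_pyRange]
  congr 1
  refine congrArg List.sum (List.map_congr_left ?_)
  intro s hs
  rw [List.countP_map]
  exact countP_pyRange _ _ _

lemma solution_eq_rk_sum (S : String) :
    solution S = ((∑ s ∈ Finset.Ico (1 : Int) (S.toList.length : Int),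
      ∑ e ∈ Finset.Ico (1 : Int) (S.toList.length : Int),
        if 0 < rk (aPos S.toList) s ∧ rk (aPos S.toList) s < rk (aPos S.toList) e ∧
           rk (aPos S.toList) e < (aPos S.toList).length then 1 else 0 : Nat) : Int) := by
  rw [solution_eq_qb_sum, PySem.Str.len_eq]
  congr 1
  refine Finset.sum_congr rfl ?_
  intro s hs
  rw [Finset.mem_Ico] at hs
  rw [Finset.card_filter]
  rw [← Finset.sum_subset (Finset.Ico_subset_Ico (by omega) le_rfl :
        Finset.Ico (s + 1) (S.toList.length : Int) ⊆ Finset.Ico 1 (S.toList.length : Int))]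
  · refine Finset.sum_congr rfl ?_
    intro e he
    rw [Finset.mem_Ico] at he
    rw [if_congr (qb_iff S (by omega) (by omega)) rfl rfl]
  · intro e he hne
    rw [Finset.mem_Ico] at he
    rw [Finset.mem_Ico] at hne
    have hes : e ≤ s := by omega
    rw [if_neg]
    rintro ⟨-, hlt, -⟩
    have := rk_mono (aPos S.toList) (by omega : e ≤ s)
    omega

-- ---------- fiberwise summation over ranks ----------

lemma sum_fiber (n : Int) (P : List Nat) (G : Nat → Nat) :
    (∑ x ∈ Finset.Ico (1 : Int) n, G (rk P x))
      = ∑ j ∈ Finset.range (P.length + 1),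
          ((Finset.Ico (1 : Int) n).filter (fun x => rk P x = j)).card * G j := by
  rw [← Finset.sum_fiberwise_of_maps_to
    (fun x _ => Finset.mem_range.2 (Nat.lt_succ_of_le (rk_le P x)))]
  refine Finset.sum_congr rfl ?_
  intro j _
  rw [Finset.card_eq_sum_ones, Finset.sum_mul, one_mul]
  refine Finset.sum_congr rfl ?_
  intro x hx
  rw [Finset.mem_filter] at hx
  rw [hx.2]

-- cardinal of a rank fiber: an interval between consecutive 'a'-positions
lemma fiber_card (L : List Char) {j : Nat} (hj0 : 0 < j) (hjm : j < (aPos L).length) :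
    ((Finset.Ico (1 : Int) (L.length : Int)).filter (fun x => rk (aPos L) x = j)).card
      = (aPos L).getD j 0 - (aPos L).getD (j - 1) 0 := by
  set P := aPos L with hP
  have hsort := sorted_aPos L
  have hjm1 : j - 1 < P.length := by omega
  have hPj : P[j] < L.length := (mem_aPos.1 (List.getElem_mem hjm)).1
  have hmono : P[j - 1] < P[j] :=
    (List.pairwise_iff_getElem.1 hsort) (j - 1) j hjm1 hjm (by omega)
  have hfe : (Finset.Ico (1 : Int) (L.length : Int)).filter (fun x => rk P x = j)
      = Finset.Ioc ((P[j - 1] : Int)) ((P[j] : Int)) := by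
    ext x
    rw [Finset.mem_filter, Finset.mem_Ico, Finset.mem_Ioc]
    have h1 := lt_rk_iff P hsort hjm1 x
    have h2 := lt_rk_iff P hsort hjm x
    have hrl := rk_le P x
    constructor
    · rintro ⟨⟨hx1, hxn⟩, hrk⟩
      have : j - 1 < rk P x := by omega
      have hgt := h1.1 this
      have hng : ¬ ((P[j] : Int) < x) := fun hc => by have := h2.2 hc; omega
      exact ⟨hgt, by omega⟩
    · rintro ⟨hgt, hle⟩
      have ha : j - 1 < rk P x := h1.2 hgt
      have hb : ¬ (j < rk P x) := fun hc => by have := h2.1 hc; omega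
      have h0 : (0 : Int) ≤ (P[j - 1] : Int) := by positivity
      exact ⟨⟨by omega, by omega⟩, by omega⟩
  rw [hfe, Int.card_Ioc]
  rw [List.getD_eq_getElem _ _ hjm, List.getD_eq_getElem _ _ hjm1]
  omega

-- the common combinatorial value: sum of products of gaps between consecutive 'a'-positions
def keyN (L : List Char) : Nat :=
  ∑ j ∈ Finset.range ((aPos L).length + 1), ∑ k ∈ Finset.range ((aPos L).length + 1),
    if 0 < j ∧ j < k ∧ k < (aPos L).length
    then ((aPos L).getD j 0 - (aPos L).getD (j - 1) 0) *
         ((aPos L).getD k 0 - (aPos L).getD (k - 1) 0)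
    else 0

lemma solution_eq_key (S : String) : solution S = (keyN S.toList : Int) := by
  rw [solution_eq_rk_sum, keyN]
  congr 1
  set P := aPos S.toList with hP
  set n : Int := (S.toList.length : Int) with hn
  have houter := sum_fiber n P
    (fun j => ∑ e ∈ Finset.Ico (1 : Int) n, if 0 < j ∧ j < rk P e ∧ rk P e < P.length then 1 else 0)
  simp only [] at houter
  rw [houter]
  refine Finset.sum_congr rfl ?_
  intro j hj
  have hinner := sum_fiber n P (fun k => if 0 < j ∧ j < k ∧ k < P.length then 1 else 0)
  simp only [] at hinner
  rw [hinner, Finset.mul_sum]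
  refine Finset.sum_congr rfl ?_
  intro k hk
  by_cases hc : 0 < j ∧ j < k ∧ k < P.length
  · have hjm : j < P.length := by omega
    have hkm : k < P.length := by omega
    rw [fiber_card S.toList hc.1 hjm, fiber_card S.toList (by omega) hkm]
    have hj1 : j - 1 < P.length := by omega
    have hk1 : k - 1 < P.length := by omega
    rw [← hP]
    simp [hc, List.getElem?_eq_getElem, hjm, hj1, hk1]
  · simp [hc]

-- ---------- port B: the position list is aPos, cast to Int ----------

lemma enum_filter_map (L : List Char) (s : Int) :
    (((PySem.List.enumerate L s).filter (fun p => p.2 == 'a')).map (·.1))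
      = ((List.range L.length).filter (fun i => L.getD i ' ' == 'a')).map (fun (i : Nat) => s + (i : Int)) := by
  induction L generalizing s with
  | nil => simp [PySem.List.enumerate_nil]
  | cons c t ih =>
    rw [PySem.List.enumerate_cons, List.length_cons, List.range_succ_eq_map]
    rw [List.filter_cons, List.filter_cons]
    have hmap : ((List.range t.length).map Nat.succ).filter (fun i => (c :: t).getD i ' ' == 'a')
        = ((List.range t.length).filter (fun i => t.getD i ' ' == 'a')).map Nat.succ := by
      rw [List.filter_map]
      congr 1
    have htail : (((List.range t.length).filter (fun i => t.getD i ' ' == 'a')).map Nat.succ).map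
          (fun (i : Nat) => s + (i : Int))
        = ((List.range t.length).filter (fun i => t.getD i ' ' == 'a')).map
            (fun (i : Nat) => (s + 1) + (i : Int)) := by
      rw [List.map_map]
      refine List.map_congr_left ?_
      intro a _
      simp [Function.comp]
      ring
    by_cases hc : (c == 'a') = true
    · rw [if_pos hc, if_pos (show ((c :: t).getD 0 ' ' == 'a') = true by simpa using hc)]
      rw [List.map_cons, List.map_cons, hmap, htail, ih]
      simp
    · rw [if_neg hc, if_neg (show ¬ ((c :: t).getD 0 ' ' == 'a') = true by simpa using hc)]
      rw [hmap, htail, ih]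

lemma posB_eq (L : List Char) :
    (((PySem.List.enumerate L 0).filter (fun p => p.2 == 'a')).map (·.1))
      = (aPos L).map (fun (i : Nat) => (i : Int)) := by
  rw [enum_filter_map, aPos]
  refine List.map_congr_left ?_
  intro a _
  simp

lemma zip_tail_map (P : List Nat) :
    ((P.map (fun (i : Nat) => (i : Int))).zip ((P.map (fun (i : Nat) => (i : Int))).tail)).map
        (fun pq => pq.2 - pq.1)
      = (List.range (P.length - 1)).map
          (fun a => ((P.getD (a + 1) 0 : Nat) : Int) - ((P.getD a 0 : Nat) : Int)) := by
  apply List.ext_getElem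
  · simp [List.length_zip, List.length_tail]
  · intro a h1 h2
    have hlen : a < P.length - 1 := by
      simp [List.length_zip, List.length_tail] at h1; omega
    have ha1 : a + 1 < P.length := by omega
    have ha0 : a < P.length := by omega
    simp [List.getElem_zip, List.getElem_tail, ha0, ha1]

lemma sum_map_range (M : Nat) (f : Nat → Int) :
    ((List.range M).map f).sum = ∑ a ∈ Finset.range M, f a := by
  rw [← List.toFinset_range]
  exact (List.sum_toFinset f (List.nodup_range)).symm

lemma sq_identity (M : Nat) (γ : Nat → Int) :
    (∑ a ∈ Finset.range M, γ a) * (∑ a ∈ Finset.range M, γ a) - ∑ a ∈ Finset.range M, γ a * γ a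
      = 2 * ∑ a ∈ Finset.range M, ∑ b ∈ Finset.range M, if a < b then γ a * γ b else 0 := by
  have expand : ∀ a b : Nat, γ a * γ b
      = (if a < b then γ a * γ b else 0) + (if a = b then γ a * γ b else 0)
        + (if b < a then γ a * γ b else 0) := by
    intro a b
    rcases lt_trichotomy a b with h | h | h
    · rw [if_pos h, if_neg (by omega), if_neg (by omega)]; ring
    · rw [if_neg (by omega), if_pos h, if_neg (by omega)]; ring
    · rw [if_neg (by omega), if_neg (by omega), if_pos h]; ring
  have h1 : (∑ a ∈ Finset.range M, γ a) * (∑ a ∈ Finset.range M, γ a)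
      = (∑ a ∈ Finset.range M, ∑ b ∈ Finset.range M, if a < b then γ a * γ b else 0)
        + (∑ a ∈ Finset.range M, ∑ b ∈ Finset.range M, if a = b then γ a * γ b else 0)
        + (∑ a ∈ Finset.range M, ∑ b ∈ Finset.range M, if b < a then γ a * γ b else 0) := by
    rw [Finset.sum_mul_sum, ← Finset.sum_add_distrib, ← Finset.sum_add_distrib]
    refine Finset.sum_congr rfl ?_
    intro a _
    rw [← Finset.sum_add_distrib, ← Finset.sum_add_distrib]
    exact Finset.sum_congr rfl (fun b _ => expand a b)
  have h2 : (∑ a ∈ Finset.range M, ∑ b ∈ Finset.range M, if a = b then γ a * γ b else 0)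
      = ∑ a ∈ Finset.range M, γ a * γ a := by
    refine Finset.sum_congr rfl ?_
    intro a ha
    rw [Finset.sum_ite_eq (Finset.range M) a (fun b => γ a * γ b), if_pos ha]
  have h3 : (∑ a ∈ Finset.range M, ∑ b ∈ Finset.range M, if b < a then γ a * γ b else 0)
      = ∑ a ∈ Finset.range M, ∑ b ∈ Finset.range M, if a < b then γ a * γ b else 0 := by
    rw [Finset.sum_comm]
    refine Finset.sum_congr rfl ?_
    intro b _
    refine Finset.sum_congr rfl ?_
    intro a _
    exact if_congr Iff.rfl (mul_comm _ _) rfl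
  rw [h1, h2, h3]
  ring

lemma reindex (m : Nat) (g : Nat → Int) :
    (∑ j ∈ Finset.range (m + 1), ∑ k ∈ Finset.range (m + 1),
        if 0 < j ∧ j < k ∧ k < m then g j * g k else 0)
      = ∑ a ∈ Finset.range (m - 1), ∑ b ∈ Finset.range (m - 1),
          if a < b then g (a + 1) * g (b + 1) else 0 := by
  rw [Finset.sum_range_succ']
  rw [show (∑ k ∈ Finset.range (m + 1), if 0 < 0 ∧ 0 < k ∧ k < m then g 0 * g k else 0) = 0 from
    Finset.sum_eq_zero (fun k _ => if_neg (by omega))]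
  rw [add_zero]
  have hinner : ∀ j, (∑ k ∈ Finset.range (m + 1),
        if 0 < j + 1 ∧ j + 1 < k ∧ k < m then g (j + 1) * g k else 0)
      = ∑ k ∈ Finset.range m, if j < k ∧ k < m - 1 then g (j + 1) * g (k + 1) else 0 := by
    intro j
    rw [Finset.sum_range_succ']
    rw [show (if 0 < j + 1 ∧ j + 1 < 0 ∧ 0 < m then g (j + 1) * g 0 else 0) = 0 from
      if_neg (by omega)]
    rw [add_zero]
    exact Finset.sum_congr rfl (fun k _ => if_congr (by omega) rfl rfl)
  rw [show (∑ j ∈ Finset.range m, ∑ k ∈ Finset.range (m + 1),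
        if 0 < j + 1 ∧ j + 1 < k ∧ k < m then g (j + 1) * g k else 0)
      = ∑ j ∈ Finset.range m, ∑ k ∈ Finset.range m,
        if j < k ∧ k < m - 1 then g (j + 1) * g (k + 1) else 0 from
    Finset.sum_congr rfl (fun j _ => hinner j)]
  have hshrink : ∀ j, (∑ k ∈ Finset.range m, if j < k ∧ k < m - 1 then g (j + 1) * g (k + 1) else 0)
      = ∑ k ∈ Finset.range (m - 1), if j < k then g (j + 1) * g (k + 1) else 0 := by
    intro j
    rw [← Finset.sum_subset (Finset.range_mono (by omega : m - 1 ≤ m))]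
    · exact Finset.sum_congr rfl (fun k hk => if_congr
        (by rw [Finset.mem_range] at hk; omega) rfl rfl)
    · intro k hk hnk
      rw [Finset.mem_range] at hk
      rw [Finset.mem_range] at hnk
      exact if_neg (by omega)
  rw [show (∑ j ∈ Finset.range m, ∑ k ∈ Finset.range m,
        if j < k ∧ k < m - 1 then g (j + 1) * g (k + 1) else 0)
      = ∑ j ∈ Finset.range m, ∑ k ∈ Finset.range (m - 1),
        if j < k then g (j + 1) * g (k + 1) else 0 from
    Finset.sum_congr rfl (fun j _ => hshrink j)]
  rw [← Finset.sum_subset (Finset.range_mono (by omega : m - 1 ≤ m))]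
  intro j hj hnj
  rw [Finset.mem_range] at hj
  rw [Finset.mem_range] at hnj
  exact Finset.sum_eq_zero (fun k hk => if_neg (by rw [Finset.mem_range] at hk; omega))

-- the gap, as an integer
def gz (P : List Nat) (j : Nat) : Int := ((P.getD j 0 : Nat) : Int) - ((P.getD (j - 1) 0 : Nat) : Int)

lemma keyN_cast (L : List Char) :
    ((keyN L : Nat) : Int)
      = ∑ j ∈ Finset.range ((aPos L).length + 1), ∑ k ∈ Finset.range ((aPos L).length + 1),
          if 0 < j ∧ j < k ∧ k < (aPos L).length then gz (aPos L) j * gz (aPos L) k else 0 := by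
  rw [keyN, Nat.cast_sum]
  refine Finset.sum_congr rfl ?_
  intro j _
  rw [Nat.cast_sum]
  refine Finset.sum_congr rfl ?_
  intro k _
  by_cases hc : 0 < j ∧ j < k ∧ k < (aPos L).length
  · rw [if_pos hc, if_pos hc]
    have hsort := sorted_aPos L
    have hjm : j < (aPos L).length := by omega
    have hkm : k < (aPos L).length := by omega
    have hj1 : j - 1 < (aPos L).length := by omega
    have hk1 : k - 1 < (aPos L).length := by omega
    have hmj : (aPos L).getD (j - 1) 0 ≤ (aPos L).getD j 0 := by
      rw [List.getD_eq_getElem _ _ hjm, List.getD_eq_getElem _ _ hj1]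
      exact le_of_lt ((List.pairwise_iff_getElem.1 hsort) (j - 1) j hj1 hjm (by omega))
    have hmk : (aPos L).getD (k - 1) 0 ≤ (aPos L).getD k 0 := by
      rw [List.getD_eq_getElem _ _ hkm, List.getD_eq_getElem _ _ hk1]
      exact le_of_lt ((List.pairwise_iff_getElem.1 hsort) (k - 1) k hk1 hkm (by omega))
    rw [gz, gz, Nat.cast_mul, Nat.cast_sub hmj, Nat.cast_sub hmk]
  · rw [if_neg hc, if_neg hc, Nat.cast_zero]

lemma alt_eq_key (S : String) : solution_alt S = ((keyN S.toList : Nat) : Int) := by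
  rw [solution_alt]
  simp only [posB_eq]
  rw [List.length_map]
  set P := aPos S.toList with hP
  by_cases hm : P.length < 3
  · rw [if_pos hm, keyN]
    rw [show (∑ j ∈ Finset.range ((aPos S.toList).length + 1),
          ∑ k ∈ Finset.range ((aPos S.toList).length + 1),
          if 0 < j ∧ j < k ∧ k < (aPos S.toList).length
          then ((aPos S.toList).getD j 0 - (aPos S.toList).getD (j - 1) 0) *
               ((aPos S.toList).getD k 0 - (aPos S.toList).getD (k - 1) 0)
          else 0) = 0 from
      Finset.sum_eq_zero (fun j _ => Finset.sum_eq_zero (fun k _ => if_neg (by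
        rw [← hP]; omega)))]
    simp
  · rw [if_neg hm]
    rw [zip_tail_map P]
    rw [List.map_map]
    rw [sum_map_range, sum_map_range]
    rw [show (∑ a ∈ Finset.range (P.length - 1),
          ((fun g => g * g) ∘ fun a => ((P.getD (a + 1) 0 : Nat) : Int) - ((P.getD a 0 : Nat) : Int)) a)
        = ∑ a ∈ Finset.range (P.length - 1),
            (((P.getD (a + 1) 0 : Nat) : Int) - ((P.getD a 0 : Nat) : Int)) *
            (((P.getD (a + 1) 0 : Nat) : Int) - ((P.getD a 0 : Nat) : Int)) from
      Finset.sum_congr rfl (fun a _ => rfl)]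
    rw [sq_identity (P.length - 1) (fun a => ((P.getD (a + 1) 0 : Nat) : Int) - ((P.getD a 0 : Nat) : Int))]
    rw [PySem.Int.floordiv_eq_ediv_of_pos (by norm_num : (0 : Int) < 2),
      Int.mul_ediv_cancel_left _ (by norm_num)]
    rw [keyN_cast, ← hP, reindex P.length (gz P)]
    refine Finset.sum_congr rfl ?_
    intro a _
    refine Finset.sum_congr rfl ?_
    intro b _
    refine if_congr Iff.rfl ?_ rfl
    simp [gz]

-- ===== VERDICT (by name: the statement is the Claim_ definition above) =====
theorem solution_spec : Claim_equal_solution := by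
  intro S _
  rw [Spec_solution, solution_eq_key, alt_eq_key]
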